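-- pv_equiv track=rewrite | github.com/c3110y3110/contrakg_constraints | contrakg/eval.py | violates_single_value
-- ===== SOURCE A (Python) =====
-- from typing import Dict, Any, List, Optional
--
-- def violates_single_value(triples: List[Dict[str,str]], c: Dict[str, Any]) -> bool:
--     if not c.get("single_value", False):
--         return False
--     seen = {}
--     for t in triples:
--         key = (t["subj"], t["pid"])
--         seen.setdefault(key, set()).add(t["obj"])
--     return any(len(v) >= 2 for v in seen.values())
-- ===== SOURCE B (Python) =====
-- from typing import Dict, Any, List
--
-- def violates_single_value(triples: List[Dict[str, str]], c: Dict[str, Any]) -> bool: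
--     if not c.get("single_value", False):
--         return False
--     triple_set = {(t["subj"], t["pid"], t["obj"]) for t in triples}
--     key_set = {(t["subj"], t["pid"]) for t in triples}
--     return len(triple_set) > len(key_set)
-- ===== Notes on version B (the rewrite author's own statement) =====
-- stated objective: simpler
-- what changed: Replaces the per-key dict-of-sets grouping with two set comprehensions and a cardinality comparison: some (subj,pid) has two distinct objects iff the distinct full triples outnumber the distinct keys.
import Mathlib
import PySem

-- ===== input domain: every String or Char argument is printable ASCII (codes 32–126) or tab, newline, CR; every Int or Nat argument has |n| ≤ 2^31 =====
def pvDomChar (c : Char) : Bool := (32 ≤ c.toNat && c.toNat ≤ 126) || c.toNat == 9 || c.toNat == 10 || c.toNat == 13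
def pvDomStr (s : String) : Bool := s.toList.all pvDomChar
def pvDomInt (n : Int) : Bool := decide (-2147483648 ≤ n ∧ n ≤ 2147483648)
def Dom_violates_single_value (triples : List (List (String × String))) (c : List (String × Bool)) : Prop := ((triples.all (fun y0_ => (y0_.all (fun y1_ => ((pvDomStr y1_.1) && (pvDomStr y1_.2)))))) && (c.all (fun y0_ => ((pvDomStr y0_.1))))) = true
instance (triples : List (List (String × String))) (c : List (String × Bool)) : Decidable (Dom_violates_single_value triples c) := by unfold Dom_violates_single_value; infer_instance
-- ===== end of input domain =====

-- B replaces A's per-key dict-of-sets grouping by comparing the cardinalities of the set of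
-- distinct (subj,pid,obj) triples and the set of distinct (subj,pid) keys (objective: simpler).


-- ===== PORT A =====
-- t["k"] lookup; the "" default is only reached outside Pre_ (where Python raises KeyError)
def pvGetS (t : List (String × String)) (k : String) : String :=
  PySem.Dict.getD (PySem.Dict.mk t) k ""

def violates_single_value (triples : List (List (String × String))) (c : List (String × Bool)) : Bool :=
  if !(PySem.Dict.getD (PySem.Dict.mk c) "single_value" false) then false
  else
    let seen : PySem.Dict (String × String) (PySem.Set String) :=
      triples.foldl (fun seen t =>
        let key := (pvGetS t "subj", pvGetS t "pid")
        seen.insert key (PySem.Set.add (seen.getD key PySem.Set.empty) (pvGetS t "obj")))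
        PySem.Dict.empty
    seen.values.any (fun v => decide (2 ≤ PySem.Set.len v))

-- ===== PORT B =====
def violates_single_value_alt (triples : List (List (String × String))) (c : List (String × Bool)) : Bool :=
  if !(PySem.Dict.getD (PySem.Dict.mk c) "single_value" false) then false
  else
    let tripleSet : PySem.Set (String × String × String) :=
      PySem.Set.ofList (triples.map (fun t => (pvGetS t "subj", pvGetS t "pid", pvGetS t "obj")))
    let keySet : PySem.Set (String × String) :=
      PySem.Set.ofList (triples.map (fun t => (pvGetS t "subj", pvGetS t "pid")))
    decide (PySem.Set.len keySet < PySem.Set.len tripleSet)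

-- ===== PRECONDITION & SPEC =====
-- Pre_ excludes only the inputs where Python A raises KeyError: the "single_value" flag is set
-- and some triple dict lacks one of the keys "subj"/"pid"/"obj" (Python B raises there too).
def Pre_violates_single_value (triples : List (List (String × String))) (c : List (String × Bool)) : Prop :=
  PySem.Dict.getD (PySem.Dict.mk c) "single_value" false = false ∨
  triples.all (fun t => (PySem.Dict.mk t).contains "subj" && (PySem.Dict.mk t).contains "pid" && (PySem.Dict.mk t).contains "obj") = true
instance (triples : List (List (String × String))) (c : List (String × Bool)) : Decidable (Pre_violates_single_value triples c) := by unfold Pre_violates_single_value; infer_instance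

def pvWitness_violates_single_value : (List (List (String × String))) × (List (String × Bool)) :=
  ([[("subj", "a"), ("pid", "p"), ("obj", "x")], [("subj", "a"), ("pid", "p"), ("obj", "y")]], [("single_value", true)])

def Spec_violates_single_value (triples : List (List (String × String))) (c : List (String × Bool)) (out : Bool) : Prop := out = violates_single_value_alt triples c
instance (triples : List (List (String × String))) (c : List (String × Bool)) (out : Bool) : Decidable (Spec_violates_single_value triples c out) := by unfold Spec_violates_single_value; infer_instance

-- ===== CLAIM (what is proved, stated in full; the proofs are below) =====
def Claim_equal_violates_single_value : Prop := ∀ (triples : List (List (String × String))) (c : List (String × Bool)), Dom_violates_single_value triples c → Pre_violates_single_value triples c → Spec_violates_single_value triples c (violates_single_value triples c)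

-- ===== LEMMAS AND PROOFS =====

-- The value stored under k by A's grouping loop: the objects of the elements with key k, as a set.
theorem pv_loop_getD {κ ν α : Type} [BEq κ] [LawfulBEq κ] [DecidableEq κ] [BEq ν]
    (key : α → κ) (obj : α → ν) (l : List α) (d : PySem.Dict κ (PySem.Set ν)) (k : κ) :
    (l.foldl (fun d a => d.insert (key a) (PySem.Set.add (d.getD (key a) PySem.Set.empty) (obj a))) d).getD k PySem.Set.empty
      = ((l.filter (fun a => key a == k)).map obj).foldl PySem.Set.add (d.getD k PySem.Set.empty) := by
  induction l generalizing d with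
  | nil => rfl
  | cons a l ih =>
    simp only [List.foldl_cons, List.filter_cons]
    by_cases h : key a = k
    · subst h
      simp only [beq_self_eq_true, if_pos, List.map_cons, List.foldl_cons]
      rw [ih, PySem.Dict.getD_insert]
      simp
    · have hb : (key a == k) = false := by simp [h]
      rw [hb]
      simp only [Bool.false_eq_true, if_false]
      rw [ih, PySem.Dict.getD_insert]
      simp [Ne.symm h]

-- Changing the summand at one position of a Nodup list
theorem pv_sum_map_congr_except {κ : Type} (l : List κ) (hl : l.Nodup) (k : κ) (hk : k ∈ l)
    (f g : κ → Nat) (h : ∀ j ∈ l, j ≠ k → f j = g j) :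
    (l.map g).sum + f k = (l.map f).sum + g k := by
  induction l with
  | nil => cases hk
  | cons a l ih =>
    simp only [List.map_cons, List.sum_cons]
    rcases List.mem_cons.mp hk with rfl | hk'
    · have : ∀ j ∈ l, f j = g j := by
        intro j hj
        exact h j (List.mem_cons_of_mem _ hj) (fun hjk => (List.nodup_cons.mp hl).1 (hjk ▸ hj))
      rw [List.map_congr_left fun j hj => (this j hj).symm]
      omega
    · have ha : f a = g a := h a (List.mem_cons_self) (fun hak => (List.nodup_cons.mp hl).1 (hak ▸ hk'))
      have := ih (List.nodup_cons.mp hl).2 hk' (fun j hj hjk => h j (List.mem_cons_of_mem _ hj) hjk)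
      omega

-- Partition of the distinct elements of l by key: |set(l)| is the sum, over the distinct keys,
-- of the number of distinct objects under that key.
theorem pv_length_ofList_eq_sum {κ ν α : Type} [BEq κ] [LawfulBEq κ] [DecidableEq κ]
    [BEq ν] [LawfulBEq ν] [BEq α] [LawfulBEq α]
    (key : α → κ) (obj : α → ν)
    (hinj : ∀ a b : α, key a = key b → obj a = obj b → a = b) (l : List α) :
    (PySem.Set.ofList l).length
      = ((PySem.Set.ofList (l.map key)).map
          (fun k => (PySem.Set.ofList ((l.filter (fun a => key a == k)).map obj)).length)).sum := by
  induction l using List.reverseRecOn with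
  | nil => rfl
  | append_singleton xs a ih =>
    have hfilter : ∀ k, (xs ++ [a]).filter (fun b => key b == k) =
        xs.filter (fun b => key b == k) ++ if key a == k then [a] else [] := by
      intro k; rw [List.filter_append]; by_cases h : key a = k <;> simp [h]
    have hFne : ∀ k, k ≠ key a →
        (PySem.Set.ofList (((xs ++ [a]).filter (fun b => key b == k)).map obj)).length
          = (PySem.Set.ofList ((xs.filter (fun b => key b == k)).map obj)).length := by
      intro k hk
      rw [hfilter k]
      have hb : (key a == k) = false := by simp [Ne.symm hk]
      rw [hb]
      simp
    have hmem_iff : (obj a ∈ (xs.filter (fun b => key b == key a)).map obj) ↔ a ∈ xs := by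
      constructor
      · rintro hm
        rcases List.mem_map.mp hm with ⟨b, hb, hob⟩
        rcases List.mem_filter.mp hb with ⟨hbx, hbk⟩
        have : b = a := hinj b a (by simpa using hbk) hob
        exact this ▸ hbx
      · intro hax
        exact List.mem_map.mpr ⟨a, List.mem_filter.mpr ⟨hax, by simp⟩, rfl⟩
    have hFk : (PySem.Set.ofList (((xs ++ [a]).filter (fun b => key b == key a)).map obj)).length
        = (PySem.Set.ofList ((xs.filter (fun b => key b == key a)).map obj)).length
          + (if a ∈ xs then 0 else 1) := by
      rw [hfilter (key a)]
      rw [beq_self_eq_true, if_pos rfl, List.map_append, List.map_cons, List.map_nil,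
        PySem.Set.ofList_append_singleton, PySem.Set.add_eq_ite]
      by_cases hax : a ∈ xs
      · rw [if_pos ((PySem.Set.mem_ofList _ _).mpr (hmem_iff.mpr hax)), if_pos hax]
        omega
      · rw [if_neg (fun hm => hax (hmem_iff.mp ((PySem.Set.mem_ofList _ _).mp hm))), if_neg hax]
        simp
    have hlhs : (PySem.Set.ofList (xs ++ [a])).length
        = (PySem.Set.ofList xs).length + (if a ∈ xs then 0 else 1) := by
      rw [PySem.Set.ofList_append_singleton, PySem.Set.add_eq_ite]
      by_cases hax : a ∈ xs
      · rw [if_pos ((PySem.Set.mem_ofList _ _).mpr hax), if_pos hax]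
        omega
      · rw [if_neg (fun hm => hax ((PySem.Set.mem_ofList _ _).mp hm)), if_neg hax]
        simp
    have hKset : PySem.Set.ofList ((xs ++ [a]).map key)
        = (PySem.Set.ofList (xs.map key)).add (key a) := by
      rw [List.map_append, List.map_cons, List.map_nil, PySem.Set.ofList_append_singleton]
    rw [hlhs, hKset, ih]
    by_cases hk0 : key a ∈ PySem.Set.ofList (xs.map key)
    · rw [PySem.Set.add_of_mem hk0]
      have heq : ((PySem.Set.ofList (xs.map key)).map
            (fun k => (PySem.Set.ofList (((xs ++ [a]).filter (fun b => key b == k)).map obj)).length)).sum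
            + (PySem.Set.ofList ((xs.filter (fun b => key b == key a)).map obj)).length
          = ((PySem.Set.ofList (xs.map key)).map
            (fun k => (PySem.Set.ofList ((xs.filter (fun b => key b == k)).map obj)).length)).sum
            + (PySem.Set.ofList (((xs ++ [a]).filter (fun b => key b == key a)).map obj)).length :=
        pv_sum_map_congr_except (PySem.Set.ofList (xs.map key)) (PySem.Set.nodup_ofList _)
          (key a) hk0 _ _ (fun j _ hj => (hFne j hj).symm)
      omega
    · have hax : ¬ a ∈ xs := by
        intro hax
        exact hk0 ((PySem.Set.mem_ofList _ _).mpr (List.mem_map.mpr ⟨a, hax, rfl⟩))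
      rw [PySem.Set.add_of_not_mem hk0, List.map_append, List.map_cons, List.map_nil,
        List.sum_append, List.sum_cons, List.sum_nil]
      have hemp : xs.filter (fun b => key b == key a) = [] := by
        rw [List.filter_eq_nil_iff]
        intro b hb hbk
        exact hk0 ((PySem.Set.mem_ofList _ _).mpr (List.mem_map.mpr ⟨b, hb, by simpa using hbk⟩))
      have h1 : (PySem.Set.ofList (((xs ++ [a]).filter (fun b => key b == key a)).map obj)).length = 1 := by
        rw [hfilter (key a), beq_self_eq_true, if_pos rfl, hemp]
        rfl
      rw [List.map_congr_left (fun j hj => hFne j (fun hje => hk0 (hje ▸ hj))), h1]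
      rw [if_neg hax]
      omega

-- over positive naturals, "some entry is ≥ 2" is "the sum exceeds the count"
theorem pv_any_two_le (ns : List Nat) (h : ∀ n ∈ ns, 1 ≤ n) :
    (ns.any (fun n => decide (2 ≤ n))) = decide (ns.length < ns.sum) := by
  induction ns with
  | nil => simp
  | cons n ns ih =>
    have hn := h n List.mem_cons_self
    have hrest : ∀ m ∈ ns, 1 ≤ m := fun m hm => h m (List.mem_cons_of_mem _ hm)
    have hsum : ns.length ≤ ns.sum := by
      clear ih h hn
      induction ns with
      | nil => simp
      | cons m ms ihm =>
        have := hrest m List.mem_cons_self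
        have := ihm (fun x hx => hrest x (List.mem_cons_of_mem _ hx))
        simp only [List.length_cons, List.sum_cons]; omega
    simp only [List.any_cons, ih hrest, List.length_cons, List.sum_cons]
    rcases Nat.lt_or_ge n 2 with h2 | h2
    · have : ¬ (2 ≤ n) := by omega
      simp only [this, decide_false, Bool.false_or]
      rw [decide_eq_decide]
      omega
    · simp only [h2, decide_true, Bool.true_or]
      have h3 : ns.length + 1 < n + ns.sum := by omega
      exact (decide_eq_true h3).symm

-- the two port bodies agree on every input
theorem pv_main (triples : List (List (String × String))) (c : List (String × Bool)) :
    violates_single_value triples c = violates_single_value_alt triples c := by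
  unfold violates_single_value violates_single_value_alt
  by_cases hflag : PySem.Dict.getD (PySem.Dict.mk c) "single_value" false = false
  · simp [hflag]
  · rw [Bool.not_eq_false] at hflag
    simp only [hflag, Bool.not_true, Bool.false_eq_true, if_false]
    set key : String × String × String → String × String := fun x => (x.1, x.2.1) with hkey
    set obj : String × String × String → String := fun x => x.2.2 with hobj
    set ts3 : List (String × String × String) :=
      triples.map (fun t => (pvGetS t "subj", pvGetS t "pid", pvGetS t "obj")) with hts3
    have hfold : triples.foldl (fun seen t =>
           let key := (pvGetS t "subj", pvGetS t "pid")
           seen.insert key (PySem.Set.add (seen.getD key PySem.Set.empty) (pvGetS t "obj")))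
           PySem.Dict.empty
        = ts3.foldl (fun d a => d.insert (key a) (PySem.Set.add (d.getD (key a) PySem.Set.empty) (obj a))) PySem.Dict.empty := by
      rw [hts3, List.foldl_map]
    have hkmap : triples.map (fun t => (pvGetS t "subj", pvGetS t "pid")) = ts3.map key := by
      rw [hts3, List.map_map]
      rfl
    rw [hfold, hkmap]
    set seen := ts3.foldl (fun d a => d.insert (key a) (PySem.Set.add (d.getD (key a) PySem.Set.empty) (obj a))) PySem.Dict.empty with hseen
    have hkeys : seen.keys = PySem.Set.ofList (ts3.map key) := by
      rw [hseen, PySem.Dict.keys_foldl_insert_key]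
      rw [show (PySem.Dict.empty : PySem.Dict (String × String) (PySem.Set String)).keys = ([] : List (String × String)) from rfl]
      exact PySem.Set.update_empty _
    have hnodup : seen.keys.Nodup := by rw [hkeys]; exact PySem.Set.nodup_ofList _
    have hvals : seen.values = seen.keys.map (fun k => seen.getD k PySem.Set.empty) :=
      PySem.Dict.values_eq_map_keys seen hnodup _
    have hgetD : ∀ k, seen.getD k PySem.Set.empty
        = PySem.Set.ofList ((ts3.filter (fun a => key a == k)).map obj) := by
      intro k
      rw [hseen, pv_loop_getD]
      rw [show (PySem.Dict.empty : PySem.Dict (String × String) (PySem.Set String)).getD k PySem.Set.empty = ([] : List String) from rfl]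
      exact (PySem.Set.ofList_eq_foldl _).symm
    rw [hvals, hkeys, List.any_map]
    have hinj : ∀ a b : String × String × String, key a = key b → obj a = obj b → a = b := by
      intro a b hk ho
      rw [hkey] at hk; rw [hobj] at ho
      simp only [Prod.mk.injEq] at hk
      exact Prod.ext hk.1 (Prod.ext hk.2 ho)
    have hcard := pv_length_ofList_eq_sum key obj hinj ts3
    set K := PySem.Set.ofList (ts3.map key) with hK
    set ns := K.map (fun k => (PySem.Set.ofList ((ts3.filter (fun a => key a == k)).map obj)).length) with hns
    have hpos : ∀ n ∈ ns, 1 ≤ n := by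
      intro n hn
      rcases List.mem_map.mp hn with ⟨k, hkK, rfl⟩
      have : k ∈ ts3.map key := (PySem.Set.mem_ofList _ _).mp hkK
      rcases List.mem_map.mp this with ⟨x, hx, rfl⟩
      have hxf : x ∈ ts3.filter (fun a => key a == key x) := List.mem_filter.mpr ⟨hx, by simp⟩
      have : obj x ∈ PySem.Set.ofList ((ts3.filter (fun a => key a == key x)).map obj) :=
        (PySem.Set.mem_ofList _ _).mpr (List.mem_map.mpr ⟨x, hxf, rfl⟩)
      have := List.ne_nil_of_mem this
      have := List.length_pos_iff.mpr this
      omega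
    have hany := pv_any_two_le ns hpos
    have hlen : ns.length = K.length := by rw [hns, List.length_map]
    have hLHS : K.any ((fun v => decide (2 ≤ PySem.Set.len v)) ∘ fun k => seen.getD k PySem.Set.empty)
        = ns.any (fun n => decide (2 ≤ n)) := by
      rw [hns, List.any_map]
      refine List.any_congr rfl ?_
      intro k
      simp only [Function.comp_apply, hgetD k, PySem.Set.len]
      rw [decide_eq_decide]
      exact_mod_cast Iff.rfl
    rw [hLHS, hany, hlen]
    simp only [PySem.Set.len]
    rw [decide_eq_decide, hcard]
    exact_mod_cast Iff.rfl

-- ===== VERDICT (by name: the statement is the Claim_ definition above) =====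
theorem violates_single_value_spec : Claim_equal_violates_single_value := by
  intro triples c _ _
  exact pv_main triples c
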